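-- pv_equiv track=rewrite | github.com/sparsh-karna/ingres_chatbot | taskExecutionEngine.py | generate_recommendations_from_insights
-- ===== SOURCE A (Python) =====
-- from typing import List, Dict, Any, Optional
--
-- def generate_recommendations_from_insights(insights: List[str]) -> List[str]:
--     """Generate actionable recommendations based on insights"""
--     recommendations = []
--
--     # Analyze insights for common themes
--     if any("increase" in insight.lower() or "improve" in insight.lower() for insight in insights):
--         recommendations.append("Implement improvement strategies based on identified opportunities")
--
--     if any("decrease" in insight.lower() or "decline" in insight.lower() for insight in insights):
--         recommendations.append("Address declining trends through targeted interventions")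
--
--     if any("data" in insight.lower() or "analysis" in insight.lower() for insight in insights):
--         recommendations.append("Establish data-driven decision making processes")
--
--     if any("region" in insight.lower() or "state" in insight.lower() for insight in insights):
--         recommendations.append("Develop region-specific strategies based on local conditions")
--
--     # Default recommendations if no specific patterns found
--     if not recommendations:
--         recommendations = [
--             "Monitor key performance indicators regularly",
--             "Implement evidence-based policy measures",
--             "Engage stakeholders in solution development",
--             "Establish feedback mechanisms for continuous improvement"
--         ]
--
--     return recommendations[:4]  # Return top 4 recommendations
-- ===== SOURCE B (Python) =====
-- def generate_recommendations_from_insights(insights):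
--     """Single pass: lowercase each insight once, keep four theme flags, then emit."""
--     improve = decline = data = region = False
--     for insight in insights:
--         low = insight.lower()
--         improve = improve or "increase" in low or "improve" in low
--         decline = decline or "decrease" in low or "decline" in low
--         data = data or "data" in low or "analysis" in low
--         region = region or "region" in low or "state" in low
--
--     recommendations = []
--     if improve:
--         recommendations.append("Implement improvement strategies based on identified opportunities")
--     if decline:
--         recommendations.append("Address declining trends through targeted interventions")
--     if data:
--         recommendations.append("Establish data-driven decision making processes")
--     if region:
--         recommendations.append("Develop region-specific strategies based on local conditions")
--
--     if not recommendations: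
--         recommendations = [
--             "Monitor key performance indicators regularly",
--             "Implement evidence-based policy measures",
--             "Engage stakeholders in solution development",
--             "Establish feedback mechanisms for continuous improvement",
--         ]
--     return recommendations[:4]
-- ===== Notes on version B (the rewrite author's own statement) =====
-- stated objective: faster
-- what changed: Replaces A's four separate any() scans (each lowercasing every insight again) with one pass that lowercases each insight once and maintains four boolean theme flags, then emits the canned strings in the same fixed order.
import Mathlib
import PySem

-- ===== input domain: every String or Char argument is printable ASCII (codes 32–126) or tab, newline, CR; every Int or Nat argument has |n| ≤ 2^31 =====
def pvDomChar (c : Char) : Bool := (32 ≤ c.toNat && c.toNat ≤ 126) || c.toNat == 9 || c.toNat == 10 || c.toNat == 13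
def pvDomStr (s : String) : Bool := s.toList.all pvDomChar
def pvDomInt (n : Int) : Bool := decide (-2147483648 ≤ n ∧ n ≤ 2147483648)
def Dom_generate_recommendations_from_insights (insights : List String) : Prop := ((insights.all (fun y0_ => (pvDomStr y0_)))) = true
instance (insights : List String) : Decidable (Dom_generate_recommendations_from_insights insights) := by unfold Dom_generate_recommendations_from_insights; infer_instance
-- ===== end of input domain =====

-- ===== PORT A =====
-- B is a single pass maintaining four theme flags instead of A's four any()-scans; return value only.
-- Python 'sub in insight.lower()' = PySem.Str.isIn sub (PySem.Str.lower insight); xs[:4] = List.take 4.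
def generate_recommendations_from_insights (insights : List String) : List String :=
  let recs : List String := []
  let recs := if insights.any (fun i => PySem.Str.isIn "increase" (PySem.Str.lower i) || PySem.Str.isIn "improve" (PySem.Str.lower i))
    then recs ++ ["Implement improvement strategies based on identified opportunities"] else recs
  let recs := if insights.any (fun i => PySem.Str.isIn "decrease" (PySem.Str.lower i) || PySem.Str.isIn "decline" (PySem.Str.lower i))
    then recs ++ ["Address declining trends through targeted interventions"] else recs
  let recs := if insights.any (fun i => PySem.Str.isIn "data" (PySem.Str.lower i) || PySem.Str.isIn "analysis" (PySem.Str.lower i))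
    then recs ++ ["Establish data-driven decision making processes"] else recs
  let recs := if insights.any (fun i => PySem.Str.isIn "region" (PySem.Str.lower i) || PySem.Str.isIn "state" (PySem.Str.lower i))
    then recs ++ ["Develop region-specific strategies based on local conditions"] else recs
  let recs := if recs = [] then
      ["Monitor key performance indicators regularly",
       "Implement evidence-based policy measures",
       "Engage stakeholders in solution development",
       "Establish feedback mechanisms for continuous improvement"] else recs
  recs.take 4

-- ===== PORT B =====
-- the loop body of Source B: update the four flags from one lowercased insight
def pvStepB (st : Bool × Bool × Bool × Bool) (insight : String) : Bool × Bool × Bool × Bool :=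
  let low := PySem.Str.lower insight
  (st.1 || PySem.Str.isIn "increase" low || PySem.Str.isIn "improve" low,
   st.2.1 || PySem.Str.isIn "decrease" low || PySem.Str.isIn "decline" low,
   st.2.2.1 || PySem.Str.isIn "data" low || PySem.Str.isIn "analysis" low,
   st.2.2.2 || PySem.Str.isIn "region" low || PySem.Str.isIn "state" low)

def generate_recommendations_from_insights_alt (insights : List String) : List String :=
  let st := insights.foldl pvStepB (false, false, false, false)
  let recs : List String :=
    (if st.1 then ["Implement improvement strategies based on identified opportunities"] else []) ++
    (if st.2.1 then ["Address declining trends through targeted interventions"] else []) ++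
    (if st.2.2.1 then ["Establish data-driven decision making processes"] else []) ++
    (if st.2.2.2 then ["Develop region-specific strategies based on local conditions"] else [])
  let recs := if recs = [] then
      ["Monitor key performance indicators regularly",
       "Implement evidence-based policy measures",
       "Engage stakeholders in solution development",
       "Establish feedback mechanisms for continuous improvement"] else recs
  recs.take 4

-- ===== PRECONDITION & SPEC =====
def Spec_generate_recommendations_from_insights (insights : List String) (out : List String) : Prop := out = generate_recommendations_from_insights_alt insights
instance (insights : List String) (out : List String) : Decidable (Spec_generate_recommendations_from_insights insights out) := by unfold Spec_generate_recommendations_from_insights; infer_instance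

-- ===== CLAIM (what is proved, stated in full; the proofs are below) =====
def Claim_equal_generate_recommendations_from_insights : Prop := ∀ (insights : List String), Dom_generate_recommendations_from_insights insights → Spec_generate_recommendations_from_insights insights (generate_recommendations_from_insights insights)

-- ===== LEMMAS AND PROOFS =====

-- the fold computes exactly the four any-scans
lemma foldl_pvStepB (l : List String) (a b c d : Bool) :
    l.foldl pvStepB (a, b, c, d) =
      (a || l.any (fun i => PySem.Str.isIn "increase" (PySem.Str.lower i) || PySem.Str.isIn "improve" (PySem.Str.lower i)),
       b || l.any (fun i => PySem.Str.isIn "decrease" (PySem.Str.lower i) || PySem.Str.isIn "decline" (PySem.Str.lower i)),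
       c || l.any (fun i => PySem.Str.isIn "data" (PySem.Str.lower i) || PySem.Str.isIn "analysis" (PySem.Str.lower i)),
       d || l.any (fun i => PySem.Str.isIn "region" (PySem.Str.lower i) || PySem.Str.isIn "state" (PySem.Str.lower i))) := by
  induction l generalizing a b c d with
  | nil => simp
  | cons x xs ih =>
      simp only [List.foldl_cons, List.any_cons, pvStepB, ih]
      simp [Bool.or_assoc]

-- ===== VERDICT (by name: the statement is the Claim_ definition above) =====
theorem generate_recommendations_from_insights_spec : Claim_equal_generate_recommendations_from_insights := by
  intro insights _
  unfold Spec_generate_recommendations_from_insights generate_recommendations_from_insights generate_recommendations_from_insights_alt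
  rw [foldl_pvStepB]
  cases insights.any (fun i => PySem.Str.isIn "increase" (PySem.Str.lower i) || PySem.Str.isIn "improve" (PySem.Str.lower i)) <;>
  cases insights.any (fun i => PySem.Str.isIn "decrease" (PySem.Str.lower i) || PySem.Str.isIn "decline" (PySem.Str.lower i)) <;>
  cases insights.any (fun i => PySem.Str.isIn "data" (PySem.Str.lower i) || PySem.Str.isIn "analysis" (PySem.Str.lower i)) <;>
  cases insights.any (fun i => PySem.Str.isIn "region" (PySem.Str.lower i) || PySem.Str.isIn "state" (PySem.Str.lower i)) <;> rfl
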